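-- pv_equiv track=rewrite | github.com/pspealman/Project_Impact | sigilo.py | try_kruskal_3
-- ===== SOURCE A (Python) =====
-- def try_kruskal_3(p_is, s_is, v_is):
--     if (sum(p_is) >= 5) and (sum(s_is) >= 5) and (sum(v_is) >= 5):
--         if (p_is != s_is) and (s_is != v_is):
--             is_list = [p_is, s_is, v_is]
--             for x in range(len(is_list)):
--                 for y in range(len(is_list)):
--                     if x != y:
--                         if set(is_list[x]) == set(is_list[y]):
--                             return(False)
--             return(True)
--
--     return(False)
-- ===== SOURCE B (Python) =====
-- def try_kruskal_3(p_is, s_is, v_is):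
--     if sum(p_is) >= 5 and sum(s_is) >= 5 and sum(v_is) >= 5:
--         return len({frozenset(p_is), frozenset(s_is), frozenset(v_is)}) == 3
--     return False
-- ===== Notes on version B (the rewrite author's own statement) =====
-- stated objective: idiomatic
-- what changed: Replaced the list-inequality guard plus the O(9) nested index loop of pairwise set comparisons by a single cardinality check on a set of three frozensets (the list-inequality guard is redundant since equal lists have equal sets).
import Mathlib
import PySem

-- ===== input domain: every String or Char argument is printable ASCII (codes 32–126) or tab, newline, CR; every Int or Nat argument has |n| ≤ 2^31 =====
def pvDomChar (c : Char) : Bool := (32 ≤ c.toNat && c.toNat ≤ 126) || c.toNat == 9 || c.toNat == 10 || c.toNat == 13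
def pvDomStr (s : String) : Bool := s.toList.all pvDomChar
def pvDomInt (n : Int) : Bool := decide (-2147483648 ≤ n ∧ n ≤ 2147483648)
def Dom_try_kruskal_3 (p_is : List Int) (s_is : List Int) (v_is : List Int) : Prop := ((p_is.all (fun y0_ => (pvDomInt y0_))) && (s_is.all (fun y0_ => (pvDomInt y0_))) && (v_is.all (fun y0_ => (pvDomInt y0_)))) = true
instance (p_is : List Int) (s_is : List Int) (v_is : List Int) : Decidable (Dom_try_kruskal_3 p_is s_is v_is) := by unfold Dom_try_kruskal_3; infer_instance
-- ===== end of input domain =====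

-- B replaces A's list-inequality guard and nested pairwise set-comparison loop by one cardinality
-- check on the set of the three frozensets (idiomatic; same results, not claimed faster).


-- ===== PORT A =====
def try_kruskal_3 (p_is : List Int) (s_is : List Int) (v_is : List Int) : Bool :=
  if p_is.sum ≥ 5 ∧ s_is.sum ≥ 5 ∧ v_is.sum ≥ 5 then
    if p_is ≠ s_is ∧ s_is ≠ v_is then
      let is_list := [p_is, s_is, v_is]
      -- for x in range(len(is_list)): for y in range(len(is_list)): early 'return False' on a set-equal pair
      if (PySem.List.pyRange 0 (is_list.length) 1).any (fun x =>
           (PySem.List.pyRange 0 (is_list.length) 1).any (fun y =>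
             decide (x ≠ y) &&
             PySem.Set.equal (PySem.Set.ofList (PySem.List.pyGetD is_list x []))
                             (PySem.Set.ofList (PySem.List.pyGetD is_list y []))))
      then false else true
    else false
  else false

-- ===== PORT B =====
def try_kruskal_3_alt (p_is : List Int) (s_is : List Int) (v_is : List Int) : Bool :=
  if p_is.sum ≥ 5 ∧ s_is.sum ≥ 5 ∧ v_is.sum ≥ 5 then
    -- {frozenset(p_is), frozenset(s_is), frozenset(v_is)}: hand-ported set of frozensets, dedup by
    -- frozenset equality (Set.equal); exact since only the cardinality of the set is used
    let sets := [PySem.Set.ofList s_is, PySem.Set.ofList v_is].foldl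
      (fun acc x => if acc.any (fun y => PySem.Set.equal y x) then acc else acc ++ [x])
      [PySem.Set.ofList p_is]
    sets.length == 3
  else false

-- ===== PRECONDITION & SPEC =====
def Spec_try_kruskal_3 (p_is : List Int) (s_is : List Int) (v_is : List Int) (out : Bool) : Prop := out = try_kruskal_3_alt p_is s_is v_is
instance (p_is : List Int) (s_is : List Int) (v_is : List Int) (out : Bool) : Decidable (Spec_try_kruskal_3 p_is s_is v_is out) := by unfold Spec_try_kruskal_3; infer_instance

-- ===== CLAIM (what is proved, stated in full; the proofs are below) =====
def Claim_equal_try_kruskal_3 : Prop := ∀ (p_is : List Int) (s_is : List Int) (v_is : List Int), Dom_try_kruskal_3 p_is s_is v_is → Spec_try_kruskal_3 p_is s_is v_is (try_kruskal_3 p_is s_is v_is)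

-- ===== LEMMAS AND PROOFS =====
theorem equal_symm (s t : List Int) : PySem.Set.equal s t = PySem.Set.equal t s := by
  by_cases h : PySem.Set.equal s t = true
  · rw [h]; exact ((PySem.Set.equal_iff t s).mpr (fun x => ((PySem.Set.equal_iff s t).mp h x).symm)).symm
  · rcases Bool.eq_false_iff.mpr h with _
    cases h2 : PySem.Set.equal t s
    · simp [h]
    · exact absurd ((PySem.Set.equal_iff s t).mpr (fun x => ((PySem.Set.equal_iff t s).mp h2 x).symm)) h

theorem equal_refl (s : List Int) : PySem.Set.equal s s = true :=
  (PySem.Set.equal_iff s s).mpr (fun _ => Iff.rfl)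


-- ===== VERDICT (by name: the statement is the Claim_ definition above) =====
theorem try_kruskal_3_spec : Claim_equal_try_kruskal_3 := by
  unfold Claim_equal_try_kruskal_3
  intro p s v _
  unfold Spec_try_kruskal_3 try_kruskal_3 try_kruskal_3_alt
  by_cases hs : p.sum ≥ 5 ∧ s.sum ≥ 5 ∧ v.sum ≥ 5
  · simp only [if_pos hs]
    have hr : PySem.List.pyRange 0 ((([p, s, v] : List (List Int)).length : Nat) : Int) 1 = [0, 1, 2] := by
      norm_num
      decide
    simp only [hr, List.any_cons, List.any_nil, PySem.List.pyGetD, PySem.List.pyGet?, PySem.List.pyIdx?]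
    norm_num
    simp only [show ((2:Int).toNat) = 2 from rfl, List.getElem_cons_succ, List.getElem_cons_zero]
    rw [equal_symm (PySem.Set.ofList s) (PySem.Set.ofList p),
        equal_symm (PySem.Set.ofList v) (PySem.Set.ofList p),
        equal_symm (PySem.Set.ofList v) (PySem.Set.ofList s)]
    by_cases h1 : (PySem.Set.ofList p).equal (PySem.Set.ofList s) = true <;>
    by_cases h2 : (PySem.Set.ofList p).equal (PySem.Set.ofList v) = true <;>
    by_cases h3 : (PySem.Set.ofList s).equal (PySem.Set.ofList v) = true
    · simp [h1, h2, h3, -PySem.Set.equal_iff, List.any_cons, List.any_nil]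
    · simp only [Bool.not_eq_true] at h3
      simp [h1, h2, h3, -PySem.Set.equal_iff, List.any_cons, List.any_nil]
    · simp only [Bool.not_eq_true] at h2
      simp [h1, h2, h3, -PySem.Set.equal_iff, List.any_cons, List.any_nil]
    · simp only [Bool.not_eq_true] at h2 h3
      simp [h1, h2, h3, -PySem.Set.equal_iff, List.any_cons, List.any_nil]
    · simp only [Bool.not_eq_true] at h1
      simp [h1, h2, h3, -PySem.Set.equal_iff, List.any_cons, List.any_nil]
    · simp only [Bool.not_eq_true] at h1 h3
      simp [h1, h2, h3, -PySem.Set.equal_iff, List.any_cons, List.any_nil]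
    · simp only [Bool.not_eq_true] at h1 h2
      simp [h1, h2, h3, -PySem.Set.equal_iff, List.any_cons, List.any_nil]
    · simp only [Bool.not_eq_true] at h1 h2 h3
      have hps : p ≠ s := fun h => by subst h; simp [equal_refl] at h1
      have hsv : s ≠ v := fun h => by subst h; simp [equal_refl] at h3
      simp [h1, h2, h3, hps, hsv, -PySem.Set.equal_iff, List.any_cons, List.any_nil]
  · rw [if_neg hs, if_neg hs]
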